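-- pv_equiv track=rewrite | github.com/raadslens-creator/raadslens | transcribe_vergadering.py | correct_speaker_times
-- ===== SOURCE A (Python) =====
-- def correct_speaker_times(speakers, intro_sec, silences):
--     corrected = []
--     for start, end, naam in speakers:
--         t_start = max(0, start - intro_sec)
--         t_end = max(0, end - intro_sec)
--         removed_start = sum(
--             min(sil_end, t_start) - sil_start
--             for sil_start, sil_end in silences
--             if sil_start < t_start
--         )
--         removed_end = sum(
--             min(sil_end, t_end) - sil_start
--             for sil_start, sil_end in silences
--             if sil_start < t_end
--         )
--         corrected.append((
--             max(0, t_start - removed_start),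
--             max(0, t_end - removed_end),
--             naam
--         ))
--     return corrected
-- ===== SOURCE B (Python) =====
-- def correct_speaker_times(speakers, intro_sec, silences):
--     # Silence-major traversal: per-speaker state (t_start, t_end, removed_start,
--     # removed_end) is built once, then each silence is processed a single time,
--     # updating every speaker's removed totals; sum order does not matter.
--     state = [(max(0, st - intro_sec), max(0, en - intro_sec), 0, 0)
--              for st, en, _ in speakers]
--     for s, e in silences:
--         state = [(ts, te,
--                   rs + (min(e, ts) - s if s < ts else 0),
--                   re + (min(e, te) - s if s < te else 0))
--                  for ts, te, rs, re in state]
--     return [(max(0, ts - rs), max(0, te - re), sp[2])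
--             for (ts, te, rs, re), sp in zip(state, speakers)]
-- ===== Notes on version B (the rewrite author's own statement) =====
-- stated objective: alternative
-- what changed: Speaker-major nested scans (two filtered generator sums over silences per speaker) are replaced by a silence-major sweep: per-speaker accumulators are initialised once and each silence updates all of them in one pass, exploiting that the removed-time sums are order-independent.
import Mathlib
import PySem

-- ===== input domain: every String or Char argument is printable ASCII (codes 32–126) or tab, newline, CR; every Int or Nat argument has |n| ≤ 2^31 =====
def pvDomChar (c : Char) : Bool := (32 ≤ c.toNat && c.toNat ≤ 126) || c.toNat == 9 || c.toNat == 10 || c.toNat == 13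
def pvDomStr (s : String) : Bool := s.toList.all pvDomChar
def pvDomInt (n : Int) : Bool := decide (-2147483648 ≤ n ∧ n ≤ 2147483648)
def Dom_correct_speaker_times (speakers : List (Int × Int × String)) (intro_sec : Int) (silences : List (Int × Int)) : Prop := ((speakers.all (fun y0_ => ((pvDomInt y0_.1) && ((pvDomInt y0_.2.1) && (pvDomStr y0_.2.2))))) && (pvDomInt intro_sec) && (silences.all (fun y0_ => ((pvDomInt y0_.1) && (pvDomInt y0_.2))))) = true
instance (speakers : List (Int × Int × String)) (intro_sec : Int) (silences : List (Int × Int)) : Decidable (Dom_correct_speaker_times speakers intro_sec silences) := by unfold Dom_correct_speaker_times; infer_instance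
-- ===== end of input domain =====

-- B replaces A's speaker-major nested scans by a silence-major sweep over per-speaker
-- accumulators (alternative decomposition; same results, sum order is immaterial).
-- ===== PORT A =====
-- Literal transliteration of A: speaker-major loop, two filtered generator sums per speaker.
def correct_speaker_times (speakers : List (Int × Int × String)) (intro_sec : Int) (silences : List (Int × Int)) : List (Int × Int × String) :=
  speakers.foldl (fun corrected sp =>
    let start := sp.1
    let end_ := sp.2.1
    let naam := sp.2.2
    let t_start := max 0 (start - intro_sec)
    let t_end := max 0 (end_ - intro_sec)
    let removed_start := ((silences.filter (fun q => q.1 < t_start)).map (fun q => min q.2 t_start - q.1)).sum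
    let removed_end := ((silences.filter (fun q => q.1 < t_end)).map (fun q => min q.2 t_end - q.1)).sum
    corrected ++ [(max 0 (t_start - removed_start), max 0 (t_end - removed_end), naam)]) []

-- ===== PORT B =====
-- B: silence-major sweep over per-speaker accumulator states.
def cstStep (se : Int × Int) (st : Int × Int × Int × Int) : Int × Int × Int × Int :=
  (st.1, st.2.1,
   st.2.2.1 + (if se.1 < st.1 then min se.2 st.1 - se.1 else 0),
   st.2.2.2 + (if se.1 < st.2.1 then min se.2 st.2.1 - se.1 else 0))

def correct_speaker_times_alt (speakers : List (Int × Int × String)) (intro_sec : Int) (silences : List (Int × Int)) : List (Int × Int × String) :=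
  let state0 := speakers.map (fun sp => (max 0 (sp.1 - intro_sec), max 0 (sp.2.1 - intro_sec), (0 : Int), (0 : Int)))
  let state := silences.foldl (fun st se => st.map (cstStep se)) state0
  (state.zip speakers).map (fun p => (max 0 (p.1.1 - p.1.2.2.1), max 0 (p.1.2.1 - p.1.2.2.2), p.2.2.2))

-- ===== PRECONDITION & SPEC =====
def Spec_correct_speaker_times (speakers : List (Int × Int × String)) (intro_sec : Int) (silences : List (Int × Int)) (out : List (Int × Int × String)) : Prop := out = correct_speaker_times_alt speakers intro_sec silences
instance (speakers : List (Int × Int × String)) (intro_sec : Int) (silences : List (Int × Int)) (out : List (Int × Int × String)) : Decidable (Spec_correct_speaker_times speakers intro_sec silences out) := by unfold Spec_correct_speaker_times; infer_instance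

-- ===== CLAIM (what is proved, stated in full; the proofs are below) =====
def Claim_equal_correct_speaker_times : Prop := ∀ (speakers : List (Int × Int × String)) (intro_sec : Int) (silences : List (Int × Int)), Dom_correct_speaker_times speakers intro_sec silences → Spec_correct_speaker_times speakers intro_sec silences (correct_speaker_times speakers intro_sec silences)

-- ===== LEMMAS AND PROOFS =====
-- A's removed-time sum for a threshold t.
def removedA (silences : List (Int × Int)) (t : Int) : Int :=
  ((silences.filter (fun q => q.1 < t)).map (fun q => min q.2 t - q.1)).sum

-- Folding a pointwise map over a list of states = mapping the per-element fold.
theorem foldl_map_pointwise {α β : Type} (f : β → α → α) :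
    ∀ (l : List β) (init : List α),
      l.foldl (fun st se => st.map (f se)) init = init.map (fun a => l.foldl (fun a se => f se a) a) := by
  intro l
  induction l with
  | nil => intro init; simp
  | cons x xs ih =>
    intro init
    simp [List.foldl_cons, ih, List.map_map, Function.comp]

theorem removedA_cons (q : Int × Int) (qs : List (Int × Int)) (t : Int) :
    removedA (q :: qs) t = (if q.1 < t then min q.2 t - q.1 else 0) + removedA qs t := by
  simp only [removedA, List.filter_cons, decide_eq_true_eq]
  split_ifs <;> simp

-- Per-element: folding cstStep over silences accumulates exactly A's two sums.
theorem cstStep_fold (silences : List (Int × Int)) :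
    ∀ (init : Int × Int × Int × Int),
      silences.foldl (fun a se => cstStep se a) init
        = (init.1, init.2.1, init.2.2.1 + removedA silences init.1, init.2.2.2 + removedA silences init.2.1) := by
  induction silences with
  | nil => intro init; simp [removedA]
  | cons q qs ih =>
    intro init
    simp only [List.foldl_cons]
    rw [ih, removedA_cons, removedA_cons]
    simp only [cstStep, Prod.ext_iff]
    refine ⟨trivial, trivial, by ring, by ring⟩

-- A's foldl-append loop is a map.
theorem foldl_append_map {α β : Type} (g : α → β) :
    ∀ (l : List α) (acc : List β),
      l.foldl (fun acc x => acc ++ [g x]) acc = acc ++ l.map g := by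
  intro l
  induction l with
  | nil => intro acc; simp
  | cons x xs ih => intro acc; simp [ih]

theorem zip_map_self {α β : Type} (g : α → β) :
    ∀ (l : List α), (l.map g).zip l = l.map (fun a => (g a, a)) := by
  intro l
  induction l with
  | nil => simp
  | cons x xs ih => simp [ih]

-- ===== VERDICT (by name: the statement is the Claim_ definition above) =====
theorem correct_speaker_times_spec : Claim_equal_correct_speaker_times := by
  intro speakers intro_sec silences _
  show _ = _
  unfold correct_speaker_times correct_speaker_times_alt
  simp only []
  rw [foldl_append_map, foldl_map_pointwise, List.map_map, zip_map_self, List.map_map]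
  simp only [List.nil_append]
  apply List.map_congr_left
  intro sp _
  simp only [Function.comp]
  rw [cstStep_fold]
  simp [removedA]
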